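-- pv_equiv track=rewrite | github.com/SlytherinStrive/Goodreads-challange | awards_scaper.py | merge_data_dicts
-- ===== SOURCE A (Python) =====
-- def merge_data_dicts(list_of_dictionaries):
--     all_data = {}
--     for dict in list_of_dictionaries:
--         for key, value in dict.items():
--             if key in all_data.keys():
--                 current_data = all_data[key]
--                 combined_data = current_data + value
--                 all_data[key] = combined_data
--             else:
--                 all_data[key] = value
--     return all_data
-- ===== SOURCE B (Python) =====
-- def merge_data_dicts(list_of_dictionaries):
--     # Pass 1: group all values per key, in encounter order.
--     groups = {}
--     for dictionary in list_of_dictionaries: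
--         for key, value in dictionary.items():
--             groups[key] = groups.get(key, []) + [value]
--     # Pass 2: left-fold '+' over each key's value list (no initializer:
--     # a single value passes through unchanged).
--     result = {}
--     for key, values in groups.items():
--         merged = values[0]
--         for v in values[1:]:
--             merged = merged + v
--         result[key] = merged
--     return result
-- ===== Notes on version B (the rewrite author's own statement) =====
-- stated objective: alternative
-- what changed: Replaces A's accumulate-as-you-go merge with two differently shaped passes: first build a grouping dict key -> list of values in encounter order, then fold '+' left-to-right over each group to produce the merged dict.
import Mathlib
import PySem

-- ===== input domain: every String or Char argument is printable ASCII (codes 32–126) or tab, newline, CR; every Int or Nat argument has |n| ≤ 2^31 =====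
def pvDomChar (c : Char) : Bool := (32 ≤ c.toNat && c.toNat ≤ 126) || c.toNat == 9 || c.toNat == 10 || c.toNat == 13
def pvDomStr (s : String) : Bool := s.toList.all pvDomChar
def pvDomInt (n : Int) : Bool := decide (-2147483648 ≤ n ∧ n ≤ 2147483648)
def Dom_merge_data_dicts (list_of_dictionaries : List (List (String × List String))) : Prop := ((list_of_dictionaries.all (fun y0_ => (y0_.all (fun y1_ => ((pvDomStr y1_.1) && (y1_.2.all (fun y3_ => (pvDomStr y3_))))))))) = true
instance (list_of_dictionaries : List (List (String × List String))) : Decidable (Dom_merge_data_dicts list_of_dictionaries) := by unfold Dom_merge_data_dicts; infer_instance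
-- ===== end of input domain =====

-- B replaces A's accumulate-as-you-go merge by two passes: group values per key, then fold '+' over each group (objective: alternative decomposition).

-- ===== PORT A =====
-- 'all_data[key]' is guarded by 'key in all_data.keys()', so the lookup never raises; ported as getD (exact under the guard).
def merge_data_dicts (list_of_dictionaries : List (List (String × List String))) : List (String × List String) :=
  (list_of_dictionaries.foldl
    (fun all_data d =>
      d.foldl
        (fun all_data kv =>
          if all_data.keys.contains kv.1 then
            all_data.insert kv.1 (all_data.getD kv.1 [] ++ kv.2)
          else
            all_data.insert kv.1 kv.2)
        all_data)
    PySem.Dict.empty).items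

-- ===== PORT B =====
-- left fold of '+' over a nonempty group ('merged = values[0]; for v in values[1:]: merged = merged + v'); [] case unreachable (groups are never empty)
def pvReduceAdd (vs : List (List String)) : List String :=
  match vs with
  | [] => []
  | h :: t => t.foldl (fun acc x => acc ++ x) h

def merge_data_dicts_alt (list_of_dictionaries : List (List (String × List String))) : List (String × List String) :=
  let groups : PySem.Dict String (List (List String)) :=
    list_of_dictionaries.foldl
      (fun groups d =>
        d.foldl (fun groups kv => groups.modify kv.1 [] (fun vs => vs ++ [kv.2])) groups)
      PySem.Dict.empty
  (groups.items.foldl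
      (fun result p => result.insert p.1 (pvReduceAdd p.2))
      PySem.Dict.empty).items

-- ===== PRECONDITION & SPEC =====
def Spec_merge_data_dicts (list_of_dictionaries : List (List (String × List String))) (out : List (String × List String)) : Prop := out = merge_data_dicts_alt list_of_dictionaries
instance (list_of_dictionaries : List (List (String × List String))) (out : List (String × List String)) : Decidable (Spec_merge_data_dicts list_of_dictionaries out) := by unfold Spec_merge_data_dicts; infer_instance

-- ===== CLAIM (what is proved, stated in full; the proofs are below) =====
def Claim_equal_merge_data_dicts : Prop := ∀ (list_of_dictionaries : List (List (String × List String))), Dom_merge_data_dicts list_of_dictionaries → Spec_merge_data_dicts list_of_dictionaries (merge_data_dicts list_of_dictionaries)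

-- ===== LEMMAS AND PROOFS =====

-- the relation between A's accumulator and B's grouping dict: same keys, A's value = flatten of B's group
def pvFlat (p : String × List (List String)) : String × List String := (p.1, p.2.flatten)

-- A's loop body (the if) is exactly 'modify key [] (· ++ value)'
theorem pvStepA_eq_modify (d : PySem.Dict String (List String)) (k : String) (v : List String) :
    (if d.keys.contains k then d.insert k (d.getD k [] ++ v) else d.insert k v)
      = d.modify k [] (fun vs => vs ++ v) := by
  have hkc : d.keys.contains k = d.contains k := by
    simp [PySem.Dict.contains_eq_decide_mem_keys]
  by_cases h : d.contains k = true
  · rw [if_pos (by rw [hkc]; exact h)]; rfl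
  · have hf : d.contains k = false := by simpa using h
    rw [if_neg (by rw [hkc, hf]; simp)]
    simp [PySem.Dict.modify, PySem.Dict.getD_of_not_contains _ _ hf]

theorem pvKeys_eq {dA : PySem.Dict String (List String)} {dG : PySem.Dict String (List (List String))}
    (h : dA.items = dG.items.map pvFlat) : dA.keys = dG.keys := by
  simp only [PySem.Dict.keys, h, List.map_map]
  rfl

theorem pvRel_step (k : String) (v : List String)
    (dA : PySem.Dict String (List String)) (dG : PySem.Dict String (List (List String)))
    (hnd : dG.keys.Nodup) (h : dA.items = dG.items.map pvFlat) :
    (dA.modify k [] (fun vs => vs ++ v)).items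
      = ((dG.modify k [] (fun vs => vs ++ [v])).items).map pvFlat := by
  have hkeys : dA.keys = dG.keys := pvKeys_eq h
  have hc : dA.contains k = dG.contains k := by
    simp [PySem.Dict.contains_eq_decide_mem_keys, hkeys]
  by_cases hG : dG.contains k = true
  · -- key already present: both replace the entry in place
    have hA : dA.contains k = true := by rw [hc]; exact hG
    -- find the group of k in dG
    have hkmem : k ∈ dG.keys := (PySem.Dict.contains_iff_mem_keys dG k).1 hG
    obtain ⟨p, hp, hpk⟩ : ∃ p ∈ dG.items, p.1 = k := by
      simpa [PySem.Dict.keys] using hkmem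
    obtain ⟨k', vs⟩ := p
    cases hpk
    have hGget : dG.getD k' [] = vs := PySem.Dict.getD_of_mem_items dG hp hnd []
    have hAmem : (k', vs.flatten) ∈ dA.items := by
      rw [h]; exact List.mem_map.2 ⟨(k', vs), hp, rfl⟩
    have hndA : dA.keys.Nodup := by rw [hkeys]; exact hnd
    have hAget : dA.getD k' [] = vs.flatten := PySem.Dict.getD_of_mem_items dA hAmem hndA []
    simp only [PySem.Dict.modify, PySem.Dict.items_insert, hA, hG, if_pos, h,
      List.map_map, hGget, hAget]
    apply List.map_congr_left
    intro q _
    by_cases hq : q.1 == k'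
    · simp [pvFlat, Function.comp, hq]
    · simp only [Function.comp, pvFlat]
      simp [hq]
  · -- fresh key: both append
    have hA : dA.contains k = false := by rw [hc]; simpa using hG
    have hG' : dG.contains k = false := by simpa using hG
    simp [PySem.Dict.modify, PySem.Dict.items_insert, hA, hG', h,
      PySem.Dict.getD_of_not_contains _ _ hA, PySem.Dict.getD_of_not_contains _ _ hG', pvFlat]

theorem pvRel_fold (xs : List (String × List String))
    (dA : PySem.Dict String (List String)) (dG : PySem.Dict String (List (List String)))
    (hnd : dG.keys.Nodup) (h : dA.items = dG.items.map pvFlat) :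
    (xs.foldl (fun d kv => d.modify kv.1 [] (fun vs => vs ++ kv.2)) dA).items
      = ((xs.foldl (fun d kv => d.modify kv.1 [] (fun vs => vs ++ [kv.2])) dG).items).map pvFlat := by
  induction xs generalizing dA dG with
  | nil => simpa using h
  | cons kv t ih =>
      simp only [List.foldl_cons]
      refine ih _ _ ?_ (pvRel_step kv.1 kv.2 dA dG hnd h)
      have := PySem.Dict.nodup_keys_foldl_modify_key [kv] (fun x => x.1) []
        (fun d x vs => vs ++ [x.2]) dG hnd
      simpa using this

theorem pvReduceAdd_eq_flatten (vs : List (List String)) : pvReduceAdd vs = vs.flatten := by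
  cases vs with
  | nil => rfl
  | cons h t => simp [pvReduceAdd, PySem.List.foldl_append_eq_flatten]

-- ===== VERDICT (by name: the statement is the Claim_ definition above) =====
theorem merge_data_dicts_spec : Claim_equal_merge_data_dicts := by
  intro l _
  unfold Spec_merge_data_dicts merge_data_dicts merge_data_dicts_alt
  -- A's branch is a modify
  have hA : ∀ (all_data : PySem.Dict String (List String)) (kv : String × List String),
      (if all_data.keys.contains kv.1 then
          all_data.insert kv.1 (all_data.getD kv.1 [] ++ kv.2)
        else all_data.insert kv.1 kv.2)
        = all_data.modify kv.1 [] (fun vs => vs ++ kv.2) := fun d kv => pvStepA_eq_modify d kv.1 kv.2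
  simp only [hA]
  -- both double loops are single loops over the flattened pair list
  rw [← List.foldl_flatten, ← List.foldl_flatten]
  set xs := l.flatten with hxs
  set groups := xs.foldl (fun d kv => d.modify kv.1 [] (fun vs => vs ++ [kv.2])) PySem.Dict.empty with hg
  have hrel : (xs.foldl (fun d kv => d.modify kv.1 [] (fun vs => vs ++ kv.2)) PySem.Dict.empty).items
      = groups.items.map pvFlat :=
    pvRel_fold xs PySem.Dict.empty PySem.Dict.empty PySem.Dict.nodup_keys_empty (by rfl)
  have hndG : groups.keys.Nodup := by
    rw [hg]
    exact PySem.Dict.nodup_keys_foldl_modify_key xs (fun x => x.1) []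
      (fun d x vs => vs ++ [x.2]) PySem.Dict.empty PySem.Dict.nodup_keys_empty
  have hfresh : (groups.items.foldl (fun r p => r.insert p.1 (pvReduceAdd p.2)) PySem.Dict.empty).items
      = PySem.Dict.empty.items ++ groups.items.map (fun p => (p.1, pvReduceAdd p.2)) := by
    refine PySem.Dict.items_foldl_insert_fresh groups.items (fun p => p.1) (fun p => pvReduceAdd p.2)
      PySem.Dict.empty (fun a _ => by simp [PySem.Dict.contains_empty]) ?_
    simpa [PySem.Dict.keys] using hndG
  rw [hrel, hfresh]
  have hpf : pvFlat = fun p : String × List (List String) => (p.1, p.2.flatten) := rfl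
  have hrd : (fun p : String × List (List String) => (p.1, pvReduceAdd p.2))
      = fun p : String × List (List String) => (p.1, p.2.flatten) := by
    funext p; rw [pvReduceAdd_eq_flatten]
  rw [hrd, hpf]
  rfl
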